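-- pv_equiv track=rewrite | github.com/XHuang02/Math381-A6 | Assignment 6.py | match_and_zero
-- ===== SOURCE A (Python) =====
-- def match_and_zero(matrix1, matrix2, cols):
--     for col in range(cols):
--         column1 = [row[col] for row in matrix1]
--         column2 = [row[col] for row in matrix2]
--         matches = set(column1) & set(column2)
--
--         if matches:
--             for row in matrix2:
--                 if row[col] in matches:
--                     row[col] = 0
--
--
--     return matrix2
-- ===== SOURCE B (Python) =====
-- def match_and_zero(matrix1, matrix2, cols):
--     # One flat hash set of (column, value) pairs from matrix1, then rebuild matrix2
--     # functionally by cell enumeration.  (Return value only: unlike A, B does NOT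
--     # mutate matrix2 in place.)
--     zeros = {(c, v) for row in matrix1 for c, v in enumerate(row) if c < cols}
--     return [[0 if c < cols and (c, v) in zeros else v for c, v in enumerate(row)]
--             for row in matrix2]
-- ===== Notes on version B (the rewrite author's own statement) =====
-- stated objective: alternative
-- what changed: A makes a pass per column, rebuilding both column lists, intersecting two sets and conditionally rewriting matrix2 in place; B instead builds one flat hash set of (column,value) cell pairs in a single sweep over matrix1's enumerated cells and rebuilds matrix2 functionally in one comprehension over its enumerated cells (no per-column passes, no intersections, no mutation).
import Mathlib
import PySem

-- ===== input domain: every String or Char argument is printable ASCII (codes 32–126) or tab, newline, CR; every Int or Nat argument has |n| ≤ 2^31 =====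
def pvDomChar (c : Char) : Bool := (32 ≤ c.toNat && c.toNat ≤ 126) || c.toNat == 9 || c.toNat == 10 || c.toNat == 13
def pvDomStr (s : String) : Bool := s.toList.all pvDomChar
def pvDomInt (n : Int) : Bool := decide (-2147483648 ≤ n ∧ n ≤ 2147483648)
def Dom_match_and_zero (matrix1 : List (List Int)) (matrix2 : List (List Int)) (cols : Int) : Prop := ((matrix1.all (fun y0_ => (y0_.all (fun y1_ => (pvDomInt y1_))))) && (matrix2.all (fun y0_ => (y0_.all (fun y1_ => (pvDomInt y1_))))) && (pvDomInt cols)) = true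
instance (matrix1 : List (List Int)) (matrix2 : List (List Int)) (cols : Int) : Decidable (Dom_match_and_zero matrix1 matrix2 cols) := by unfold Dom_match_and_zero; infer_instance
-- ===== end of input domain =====

-- B builds one flat hash set of (column, value) cell pairs from matrix1 and rebuilds matrix2
-- functionally by cell enumeration (equal return value only: the Python A mutates matrix2 in
-- place, the Python B does not mutate it).

-- ===== PORT A =====
-- [row[col] for row in m]
def pvColOf (m : List (List Int)) (c : Int) : List Int :=
  m.map (fun row => PySem.List.pyGetD row c 0)

-- one iteration of A's outer 'for col in range(cols)' loop: state = current matrix2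
def pvStepA (matrix1 : List (List Int)) (m : List (List Int)) (c : Int) : List (List Int) :=
  let column1 := pvColOf matrix1 c
  let column2 := pvColOf m c
  let matched := PySem.Set.inter (PySem.Set.ofList column1) (PySem.Set.ofList column2)
  if matched = [] then m
  else m.map (fun row =>
    if PySem.Set.contains matched (PySem.List.pyGetD row c 0)
    then PySem.List.pySetD row c 0 else row)

def match_and_zero (matrix1 : List (List Int)) (matrix2 : List (List Int)) (cols : Int) : List (List Int) :=
  (PySem.List.pyRange 0 cols 1).foldl (fun m c => pvStepA matrix1 m c) matrix2

-- ===== PORT B =====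
def match_and_zero_alt (matrix1 : List (List Int)) (matrix2 : List (List Int)) (cols : Int) : List (List Int) :=
  let zeros : PySem.Set (Int × Int) :=
    PySem.Set.ofList (matrix1.flatMap (fun row =>
      (PySem.List.enumerate row).filter (fun p => decide (p.1 < cols))))
  matrix2.map (fun row =>
    (PySem.List.enumerate row).map (fun p =>
      if p.1 < cols ∧ PySem.Set.contains zeros p then 0 else p.2))

-- ===== PRECONDITION & SPEC =====
-- Python A raises IndexError exactly when cols > 0 and some row of matrix1 or matrix2 is
-- shorter than cols; Pre_ excludes exactly those inputs (A returns everywhere else).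
def Pre_match_and_zero (matrix1 : List (List Int)) (matrix2 : List (List Int)) (cols : Int) : Prop :=
  (∀ row ∈ matrix1, cols ≤ (row.length : Int)) ∧ (∀ row ∈ matrix2, cols ≤ (row.length : Int))
instance (matrix1 : List (List Int)) (matrix2 : List (List Int)) (cols : Int) : Decidable (Pre_match_and_zero matrix1 matrix2 cols) := by unfold Pre_match_and_zero; infer_instance
def pvWitness_match_and_zero : List (List Int) × List (List Int) × Int :=
  ([[1, 2], [3, 4]], [[1, 5], [6, 2]], 2)

def Spec_match_and_zero (matrix1 : List (List Int)) (matrix2 : List (List Int)) (cols : Int) (out : List (List Int)) : Prop := out = match_and_zero_alt matrix1 matrix2 cols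
instance (matrix1 : List (List Int)) (matrix2 : List (List Int)) (cols : Int) (out : List (List Int)) : Decidable (Spec_match_and_zero matrix1 matrix2 cols out) := by unfold Spec_match_and_zero; infer_instance

-- ===== CLAIM (what is proved, stated in full; the proofs are below) =====
def Claim_equal_match_and_zero : Prop := ∀ (matrix1 : List (List Int)) (matrix2 : List (List Int)) (cols : Int), Dom_match_and_zero matrix1 matrix2 cols → Pre_match_and_zero matrix1 matrix2 cols → Spec_match_and_zero matrix1 matrix2 cols (match_and_zero matrix1 matrix2 cols)

-- ===== LEMMAS AND PROOFS =====

-- the elementwise action A performs at column c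
def pvZeroAt (matrix1 : List (List Int)) (c : Int) (row : List Int) : List Int :=
  if PySem.Set.contains (PySem.Set.ofList (pvColOf matrix1 c)) (PySem.List.pyGetD row c 0)
  then PySem.List.pySetD row c 0 else row

-- A's step: since every current entry of column c of m is a member of column2, the
-- '& set(column2)' and the 'if matched' guard change nothing.
theorem pvStepA_eq (matrix1 m : List (List Int)) (c : Int) :
    pvStepA matrix1 m c = m.map (pvZeroAt matrix1 c) := by
  simp only [pvStepA]
  have key : ∀ row ∈ m,
      PySem.Set.contains (PySem.Set.inter (PySem.Set.ofList (pvColOf matrix1 c)) (PySem.Set.ofList (pvColOf m c))) (PySem.List.pyGetD row c 0)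
      = PySem.Set.contains (PySem.Set.ofList (pvColOf matrix1 c)) (PySem.List.pyGetD row c 0) := by
    intro row hrow
    have hx : PySem.List.pyGetD row c 0 ∈ PySem.Set.ofList (pvColOf m c) := by
      rw [PySem.Set.mem_ofList _ _]
      exact List.mem_map.mpr ⟨row, hrow, rfl⟩
    rw [Bool.eq_iff_iff, PySem.Set.contains_iff, PySem.Set.contains_iff, PySem.Set.mem_inter]
    exact ⟨fun h => h.1, fun h => ⟨h, hx⟩⟩
  split_ifs with hemp
  · conv_lhs => rw [← List.map_id m]
    apply List.map_congr_left
    intro row hrow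
    have hf : PySem.Set.contains (PySem.Set.ofList (pvColOf matrix1 c)) (PySem.List.pyGetD row c 0) = false := by
      rw [← key row hrow, hemp]
      rfl
    have hnm : PySem.List.pyGetD row c 0 ∉ pvColOf matrix1 c := by
      intro hmem
      have ht := (PySem.Set.contains_iff _ _).mpr ((PySem.Set.mem_ofList _ _).mpr hmem)
      rw [hf] at ht
      exact Bool.false_ne_true ht
    simp [pvZeroAt, hnm]
  · apply List.map_congr_left
    intro row hrow
    rw [key row hrow]
    rfl

-- a fold of per-row maps is a map of per-row folds
theorem pvFoldlMap (g : Int → List Int → List Int) (cs : List Int) (m : List (List Int)) :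
    cs.foldl (fun m c => m.map (g c)) m = m.map (fun row => cs.foldl (fun r c => g c r) row) := by
  induction cs generalizing m with
  | nil => simp
  | cons c cs ih =>
    simp only [List.foldl_cons]
    rw [ih, List.map_map]
    rfl

-- B's flat set of (column, value) pairs names exactly the members of matrix1's columns
theorem pvZerosList_mem (matrix1 : List (List Int)) (cols : Int)
    (hpre : ∀ row ∈ matrix1, cols ≤ (row.length : Int))
    (c v : Int) (hc0 : 0 ≤ c) (hc : c < cols) :
    ((c, v) ∈ matrix1.flatMap (fun row =>
        (PySem.List.enumerate row).filter (fun p => decide (p.1 < cols))))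
      ↔ v ∈ pvColOf matrix1 c := by
  simp only [List.mem_flatMap, List.mem_filter, pvColOf, List.mem_map]
  constructor
  · rintro ⟨row, hrow, hmem, -⟩
    rcases (PySem.List.mem_enumerate_iff row 0 _).mp hmem with ⟨k, hk, hkeq⟩
    have hc' : c = (k : Int) := by simpa using congrArg Prod.fst hkeq
    have hv : v = row[k] := by simpa using congrArg Prod.snd hkeq
    refine ⟨row, hrow, ?_⟩
    rw [hc', hv, PySem.List.pyGetD_natCast]
    exact List.getD_eq_getElem row 0 hk
  · rintro ⟨row, hrow, hv⟩
    have hlen : c < (row.length : Int) := lt_of_lt_of_le hc (hpre row hrow)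
    have hk : c.toNat < row.length := by omega
    refine ⟨row, hrow, ?_, by simpa using hc⟩
    rw [PySem.List.mem_enumerate_iff]
    refine ⟨c.toNat, hk, ?_⟩
    have hget : PySem.List.pyGetD row c 0 = row[c.toNat] :=
      PySem.List.pyGetD_eq_getElem row 0 hc0 hlen
    rw [← hv, hget]
    simp only [Prod.mk.injEq]
    exact ⟨by omega, trivial⟩

-- characterisation of A's per-row fold over the columns (induction on the number
-- of remaining columns; mind that earlier steps only touch earlier indices)
theorem pvFoldCharAux (matrix1 : List (List Int)) (cols : Int) :
    ∀ (n : Nat) (a : Int) (r : List Int), (cols - a).toNat = n → 0 ≤ a → cols ≤ (r.length : Int) →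
    (PySem.List.pyRange a cols 1).foldl (fun s c => pvZeroAt matrix1 c s) r
      = r.mapIdx (fun k v =>
          if a ≤ (k : Int) ∧ (k : Int) < cols ∧
              PySem.Set.contains (PySem.Set.ofList (pvColOf matrix1 (k : Int))) v
          then 0 else v) := by
  intro n
  induction n with
  | zero =>
    intro a r hn ha hlen
    rw [PySem.List.pyRange_one_eq_nil (by omega)]
    simp only [List.foldl_nil]
    apply Eq.symm
    apply List.ext_getElem
    · simp
    · intro k h1 h2
      rw [List.getElem_mapIdx, if_neg]
      rintro ⟨hk1, hk2, -⟩
      omega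
  | succ n ih =>
    intro a r hn ha hlen
    have hacols : a < cols := by omega
    have haa : a.toNat < r.length := by omega
    have hga : PySem.List.pyGetD r a 0 = r[a.toNat] :=
      PySem.List.pyGetD_eq_getElem r 0 ha (by omega)
    rw [PySem.List.pyRange_one_cons hacols]
    simp only [List.foldl_cons]
    have hlen' : (pvZeroAt matrix1 a r).length = r.length := by
      unfold pvZeroAt
      split_ifs
      · exact PySem.List.length_pySetD r a 0
      · rfl
    rw [ih (a + 1) (pvZeroAt matrix1 a r) (by omega) (by omega) (by rw [hlen']; exact hlen)]
    apply List.ext_getElem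
    · simp [hlen']
    · intro k h1 h2
      have hk : k < r.length := by
        rw [List.length_mapIdx, hlen'] at h1
        exact h1
      rw [List.getElem_mapIdx, List.getElem_mapIdx]
      by_cases hm : PySem.Set.contains (PySem.Set.ofList (pvColOf matrix1 a))
          (PySem.List.pyGetD r a 0) = true
      · have hz : pvZeroAt matrix1 a r = r.set a.toNat 0 := by
          simp only [pvZeroAt, hm, if_true]
          exact PySem.List.pySetD_of_nonneg r 0 ha
        by_cases hka : (k : Int) = a
        · have hkn : k = a.toNat := by omega
          subst hkn
          have hc1 : ¬ (a + 1 ≤ ((a.toNat : Nat) : Int)) := by omega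
          rw [if_neg (by rintro ⟨h', -⟩; exact hc1 h'), if_pos]
          · simp [hz]
          · refine ⟨by omega, by omega, ?_⟩
            rw [show ((a.toNat : Nat) : Int) = a from by omega, ← hga]
            exact hm
        · have hval : (pvZeroAt matrix1 a r)[k]'(by omega) = r[k] := by
            simp only [hz, List.getElem_set]
            rw [if_neg (show ¬ a.toNat = k from fun h => hka (by omega))]
          have hiff : (a + 1 ≤ (k : Int)) ↔ (a ≤ (k : Int)) := by omega
          rw [hval]
          simp only [hiff]
      · have hz : pvZeroAt matrix1 a r = r := by
          unfold pvZeroAt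
          rw [if_neg hm]
        by_cases hka : (k : Int) = a
        · have hkn : k = a.toNat := by omega
          subst hkn
          have hval : (pvZeroAt matrix1 a r)[(a.toNat : Nat)]'(by omega) = r[a.toNat] := by
            simp [hz]
          rw [hval, if_neg (by rintro ⟨h', -⟩; omega), if_neg]
          rintro ⟨-, -, hc⟩
          rw [show ((a.toNat : Nat) : Int) = a from by omega, ← hga] at hc
          exact hm hc
        · have hval : (pvZeroAt matrix1 a r)[k]'(by omega) = r[k] := by simp [hz]
          have hiff : (a + 1 ≤ (k : Int)) ↔ (a ≤ (k : Int)) := by omega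
          rw [hval]
          simp only [hiff]

theorem pvFoldChar (matrix1 : List (List Int)) (cols : Int) (a : Int) (r : List Int)
    (ha : 0 ≤ a) (hlen : cols ≤ (r.length : Int)) :
    (PySem.List.pyRange a cols 1).foldl (fun s c => pvZeroAt matrix1 c s) r
      = r.mapIdx (fun k v =>
          if a ≤ (k : Int) ∧ (k : Int) < cols ∧
              PySem.Set.contains (PySem.Set.ofList (pvColOf matrix1 k)) v
          then 0 else v) :=
  pvFoldCharAux matrix1 cols (cols - a).toNat a r rfl ha hlen

theorem map_enumerate_eq_mapIdx (f : Int × Int → Int) (row : List Int) :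
    (PySem.List.enumerate row).map f = row.mapIdx (fun k v => f ((k : Int), v)) := by
  apply List.ext_getElem
  · simp [PySem.List.length_enumerate]
  · intro k h1 h2
    simp [PySem.List.getElem_enumerate]

-- ===== VERDICT (by name: the statement is the Claim_ definition above) =====
theorem match_and_zero_spec : Claim_equal_match_and_zero := by
  intro matrix1 matrix2 cols _ hpre
  unfold Spec_match_and_zero match_and_zero
  have h1 : (PySem.List.pyRange 0 cols 1).foldl (fun m c => pvStepA matrix1 m c) matrix2
      = (PySem.List.pyRange 0 cols 1).foldl (fun m c => m.map (pvZeroAt matrix1 c)) matrix2 :=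
    PySem.List.foldl_congr_mem _ _ _ _ (fun m c _ => pvStepA_eq matrix1 m c)
  rw [h1, pvFoldlMap]
  unfold match_and_zero_alt
  apply List.map_congr_left
  intro row hrow
  rw [pvFoldChar matrix1 cols 0 row le_rfl (hpre.2 row hrow),
      map_enumerate_eq_mapIdx]
  apply congrArg (fun f => List.mapIdx f row)
  funext k v
  simp only [Int.natCast_nonneg, true_and]
  by_cases hk : (k : Int) < cols
  · have hmem := pvZerosList_mem matrix1 cols hpre.1 (k : Int) v (Int.natCast_nonneg k) hk
    have : PySem.Set.contains
        (PySem.Set.ofList (matrix1.flatMap (fun row =>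
          (PySem.List.enumerate row).filter (fun p => decide (p.1 < cols))))) ((k : Int), v)
        = PySem.Set.contains (PySem.Set.ofList (pvColOf matrix1 k)) v := by
      rw [Bool.eq_iff_iff, PySem.Set.contains_iff, PySem.Set.contains_iff,
          PySem.Set.mem_ofList, PySem.Set.mem_ofList]
      exact hmem.trans (Iff.rfl)
    rw [this]
  · simp [hk]
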